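-- pv_equiv track=rewrite | github.com/ivan-chekunkov/Stepic | Generation_python_course_for_professional/topic_9.py | sort_priority
-- ===== SOURCE A (Python) =====
-- def sort_priority(values, group):
--     not_priority_nums = []
--     index = 0
--     while index < len(values):
--         if values[index] in group:
--             index += 1
--         else:
--             not_priority_nums.append(values[index])
--             del values[index]
--     values.sort()
--     not_priority_nums.sort()
--     for num in not_priority_nums:
--         values.append(num)
--     return values
-- ===== SOURCE B (Python) =====
-- def sort_priority(values, group):
--     values.sort(key=lambda x: (x not in group, x))
--     return values
-- ===== Notes on version B (the rewrite author's own statement) =====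
-- stated objective: idiomatic
-- what changed: Replaces the index-based while loop with del, two separate sorts and an append loop by a single in-place stable sort with the composite key (x not in group, x), which puts group members first, each block ascending.
import Mathlib
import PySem

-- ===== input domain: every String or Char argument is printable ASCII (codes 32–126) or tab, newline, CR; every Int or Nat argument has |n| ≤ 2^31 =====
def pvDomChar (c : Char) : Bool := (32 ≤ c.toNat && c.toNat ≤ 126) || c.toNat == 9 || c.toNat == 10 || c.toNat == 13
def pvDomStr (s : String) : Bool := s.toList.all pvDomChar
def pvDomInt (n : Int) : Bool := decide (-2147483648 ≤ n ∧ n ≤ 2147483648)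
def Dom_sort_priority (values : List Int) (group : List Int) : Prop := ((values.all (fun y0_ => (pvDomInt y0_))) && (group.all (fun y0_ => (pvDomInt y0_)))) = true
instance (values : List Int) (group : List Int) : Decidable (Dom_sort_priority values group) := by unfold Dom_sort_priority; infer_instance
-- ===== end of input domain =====

-- B replaces A's while-loop partition + two sorts + append loop by one in-place stable
-- sort with composite key (x not in group, x); both Pythons mutate `values` and return it —
-- the equivalence proved here is about the return value.

-- ===== PORT A =====
-- the while loop: state (values, index, not_priority_nums); `del values[index]` shortens the list
def pvLoopA (values : List Int) (group : List Int) (index : Nat) (np : List Int) :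
    List Int × List Int :=
  if h : index < values.length then
    if group.contains values[index] then
      pvLoopA values group (index + 1) np
    else
      pvLoopA (values.eraseIdx index) group index (np ++ [values[index]])
  else
    (values, np)
termination_by values.length - index
decreasing_by
  · omega
  · have := List.length_eraseIdx_of_lt (l := values) (i := index) h
    omega

def sort_priority (values : List Int) (group : List Int) : List Int :=
  let st := pvLoopA values group 0 []
  let vals := PySem.List.sorted st.1 (fun x => x)
  let np := PySem.List.sorted st.2 (fun x => x)
  np.foldl (fun acc num => acc ++ [num]) vals

-- ===== PORT B =====
-- values.sort(key=lambda x: (x not in group, x)); the Python tuple (bool, int) is encoded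
-- lexicographically with False ↦ 0, True ↦ 1
def sort_priority_alt (values : List Int) (group : List Int) : List Int :=
  PySem.List.sorted values
    (fun x => toLex (((if group.contains x then 0 else 1) : Int), x))

-- ===== PRECONDITION & SPEC =====
def Spec_sort_priority (values : List Int) (group : List Int) (out : List Int) : Prop := out = sort_priority_alt values group
instance (values : List Int) (group : List Int) (out : List Int) : Decidable (Spec_sort_priority values group out) := by unfold Spec_sort_priority; infer_instance

-- ===== CLAIM (what is proved, stated in full; the proofs are below) =====
def Claim_equal_sort_priority : Prop := ∀ (values : List Int) (group : List Int), Dom_sort_priority values group → Spec_sort_priority values group (sort_priority values group)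

-- ===== LEMMAS AND PROOFS =====

-- the loop is a stable partition: kept = members of group, np accumulates non-members
theorem pvLoopA_eq (values group : List Int) (index : Nat) (np : List Int) :
    pvLoopA values group index np =
      (values.take index ++ (values.drop index).filter (fun x => group.contains x),
       np ++ (values.drop index).filter (fun x => !(group.contains x))) := by
  fun_induction pvLoopA values group index np with
  | case1 values index np h hin ih =>
      have hd : values.drop index = values[index] :: values.drop (index + 1) :=
        (List.drop_eq_getElem_cons h).symm ▸ rfl
      rw [ih, hd, List.filter_cons, List.filter_cons]
      have ht : values.take (index + 1) = values.take index ++ [values[index]] := by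
        rw [List.take_add_one]
        simp [List.getElem?_eq_getElem h]
      have hv : values[index] ∈ group := by simpa using hin
      simp [hv]
      rw [ht, List.append_assoc, List.singleton_append]
  | case2 values index np h hin ih =>
      rw [ih]
      have hd : values.drop index = values[index] :: values.drop (index + 1) :=
        (List.drop_eq_getElem_cons h).symm ▸ rfl
      have hv : values[index] ∉ group := by simpa using hin
      have herase : values.eraseIdx index = values.take index ++ values.drop (index + 1) :=
        List.eraseIdx_eq_take_drop_succ ..
      have htake : (values.eraseIdx index).take index = values.take index := by
        rw [herase, List.take_append_of_le_length (by simp; omega), List.take_take]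
        simp
      have hdrop : (values.eraseIdx index).drop index = values.drop (index + 1) := by
        rw [herase, List.drop_append_of_le_length (by simp; omega)]
        simp
      rw [htake, hdrop, hd, List.filter_cons, List.filter_cons]
      simp [hv]
  | case3 values index np h =>
      have h' : values.length ≤ index := by omega
      rw [List.drop_eq_nil_of_le h', List.take_of_length_le h']
      simp

theorem mem_insertBy {α : Type} (b : α → α → Bool) (x y : α) (l : List α) :
    y ∈ PySem.List.insertBy b x l ↔ y = x ∨ y ∈ l := by
  induction l with
  | nil => simp [PySem.List.insertBy]
  | cons z zs ih =>
      simp only [PySem.List.insertBy]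
      split <;> simp [ih] <;> tauto

-- abbreviations for the two comparators
theorem lex_lt_iff (a b c d : Int) :
    toLex (a, b) < toLex (c, d) ↔ a < c ∨ (a = c ∧ b < d) := by
  simp [Prod.Lex.lt_iff]

-- inserting a non-member (tag 1) into tag-1-only list: lex comparison reduces to value comparison
theorem insert_lex_nonmem_aux (group : List Int) (x : Int) (N : List Int)
    (hN : ∀ n ∈ N, group.contains n = false) (hx : group.contains x = false) :
    PySem.List.insertBy
      (fun a b => decide (toLex (((if group.contains a then 0 else 1) : Int), a) <
                          toLex (((if group.contains b then 0 else 1) : Int), b))) x N =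
    PySem.List.insertBy (fun a b => decide (a < b)) x N := by
  induction N with
  | nil => rfl
  | cons n ns ih =>
      have hn := hN n (by simp)
      have h1 : (decide (toLex (((if group.contains x then 0 else 1) : Int), x) <
                         toLex (((if group.contains n then 0 else 1) : Int), n))) = decide (x < n) := by
        have hx' : x ∉ group := by simpa using hx
        have hn' : n ∉ group := by simpa using hn
        simp [hx', hn', lex_lt_iff]
      simp only [PySem.List.insertBy, h1]
      rw [ih (fun m hm => hN m (by simp [hm]))]

-- inserting a member (tag 0) into members ++ non-members lands inside the member block
theorem insert_lex_mem (group : List Int) (x : Int) (K N : List Int)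
    (hK : ∀ k ∈ K, group.contains k = true) (hN : ∀ n ∈ N, group.contains n = false)
    (hx : group.contains x = true) :
    PySem.List.insertBy
      (fun a b => decide (toLex (((if group.contains a then 0 else 1) : Int), a) <
                          toLex (((if group.contains b then 0 else 1) : Int), b))) x (K ++ N) =
    PySem.List.insertBy (fun a b => decide (a < b)) x K ++ N := by
  induction K with
  | nil =>
      cases N with
      | nil => rfl
      | cons n ns =>
          have hn := hN n (by simp)
          have h1 : (decide (toLex (((if group.contains x then 0 else 1) : Int), x) <
                             toLex (((if group.contains n then 0 else 1) : Int), n))) = true := by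
            have hx' : x ∈ group := by simpa using hx
            have hn' : n ∉ group := by simpa using hn
            simp [hx', hn', lex_lt_iff]
          simp only [List.nil_append, PySem.List.insertBy, h1, if_true]
          rfl
  | cons k ks ih =>
      have hk := hK k (by simp)
      have h1 : (decide (toLex (((if group.contains x then 0 else 1) : Int), x) <
                         toLex (((if group.contains k then 0 else 1) : Int), k))) = decide (x < k) := by
        have hx' : x ∈ group := by simpa using hx
        have hk' : k ∈ group := by simpa using hk
        simp [hx', hk', lex_lt_iff]
      simp only [List.cons_append, PySem.List.insertBy, h1]
      by_cases hxk : x < k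
      · simp [hxk]
      · simp only [hxk, decide_false, Bool.false_eq_true, if_false]
        rw [ih (fun m hm => hK m (by simp [hm]))]
        simp

-- inserting a non-member (tag 1) into members ++ non-members lands inside the non-member block
theorem insert_lex_nonmem (group : List Int) (x : Int) (K N : List Int)
    (hK : ∀ k ∈ K, group.contains k = true) (hN : ∀ n ∈ N, group.contains n = false)
    (hx : group.contains x = false) :
    PySem.List.insertBy
      (fun a b => decide (toLex (((if group.contains a then 0 else 1) : Int), a) <
                          toLex (((if group.contains b then 0 else 1) : Int), b))) x (K ++ N) =
    K ++ PySem.List.insertBy (fun a b => decide (a < b)) x N := by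
  induction K with
  | nil => simpa using insert_lex_nonmem_aux group x N hN hx
  | cons k ks ih =>
      have hk := hK k (by simp)
      have h1 : (decide (toLex (((if group.contains x then 0 else 1) : Int), x) <
                         toLex (((if group.contains k then 0 else 1) : Int), k))) = false := by
        have hx' : x ∉ group := by simpa using hx
        have hk' : k ∈ group := by simpa using hk
        simp [hx', hk', lex_lt_iff]
      simp only [List.cons_append, PySem.List.insertBy, h1, Bool.false_eq_true, if_false]
      rw [ih (fun m hm => hK m (by simp [hm]))]

-- the single lex-key insertion sort splits into the two plain insertion sorts of the blocks
theorem fold_split (group : List Int) (xs K N : List Int)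
    (hK : ∀ k ∈ K, group.contains k = true) (hN : ∀ n ∈ N, group.contains n = false) :
    xs.foldl (fun acc x => PySem.List.insertBy
      (fun a b => decide (toLex (((if group.contains a then 0 else 1) : Int), a) <
                          toLex (((if group.contains b then 0 else 1) : Int), b))) x acc) (K ++ N) =
    (xs.filter (fun x => group.contains x)).foldl
        (fun acc x => PySem.List.insertBy (fun a b => decide (a < b)) x acc) K ++
    (xs.filter (fun x => !(group.contains x))).foldl
        (fun acc x => PySem.List.insertBy (fun a b => decide (a < b)) x acc) N := by
  induction xs generalizing K N with
  | nil => rfl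
  | cons x xs ih =>
      simp only [List.foldl_cons, List.filter_cons]
      by_cases hx : group.contains x = true
      · rw [insert_lex_mem group x K N hK hN hx]
        simp only [hx, if_true, Bool.not_true, Bool.false_eq_true, if_false, List.foldl_cons]
        exact ih _ N (fun m hm => by
          rcases (mem_insertBy _ x m K).mp hm with h | h
          · exact h ▸ hx
          · exact hK m h) hN
      · have hx' : group.contains x = false := by simpa using hx
        rw [insert_lex_nonmem group x K N hK hN hx']
        simp only [hx', Bool.false_eq_true, if_false, Bool.not_false, if_true, List.foldl_cons]
        exact ih K _ hK (fun m hm => by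
          rcases (mem_insertBy _ x m N).mp hm with h | h
          · exact h ▸ hx'
          · exact hN m h)

-- ===== VERDICT (by name: the statement is the Claim_ definition above) =====
theorem sort_priority_spec : Claim_equal_sort_priority := by
  intro values group _
  unfold Spec_sort_priority sort_priority sort_priority_alt
  rw [pvLoopA_eq]
  simp only [List.take_zero, List.nil_append, List.drop_zero]
  rw [PySem.List.foldl_append_singleton]
  unfold PySem.List.sorted
  simpa using (fold_split group values [] [] (by simp) (by simp)).symm
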